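-- pv_equiv track=rewrite | github.com/streppneumo/isp | biocyc/parsing.py | lines_to_records
-- ===== SOURCE A (Python) =====
-- def lines_to_records(lines):
--     records = []
--     current = []
--     for line in lines:
--         if line.rstrip() == '//':
--             records.append(current)
--             current = []
--         else:
--             current.append(line)
--     return records
-- ===== SOURCE B (Python) =====
-- def lines_to_records(lines):
--     lines = list(lines)
--     cuts = [i for i, line in enumerate(lines) if line.rstrip() == '//']
--     records = []
--     start = 0
--     for c in cuts:
--         records.append(lines[start:c])
--         start = c + 1
--     return records
-- ===== Notes on version B (the rewrite author's own statement) =====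
-- stated objective: alternative
-- what changed: B first collects the indices of all '//' delimiter lines, then builds each record by slicing lines between consecutive delimiters (no running accumulator; the unterminated tail after the last delimiter is naturally never sliced).
import Mathlib
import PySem

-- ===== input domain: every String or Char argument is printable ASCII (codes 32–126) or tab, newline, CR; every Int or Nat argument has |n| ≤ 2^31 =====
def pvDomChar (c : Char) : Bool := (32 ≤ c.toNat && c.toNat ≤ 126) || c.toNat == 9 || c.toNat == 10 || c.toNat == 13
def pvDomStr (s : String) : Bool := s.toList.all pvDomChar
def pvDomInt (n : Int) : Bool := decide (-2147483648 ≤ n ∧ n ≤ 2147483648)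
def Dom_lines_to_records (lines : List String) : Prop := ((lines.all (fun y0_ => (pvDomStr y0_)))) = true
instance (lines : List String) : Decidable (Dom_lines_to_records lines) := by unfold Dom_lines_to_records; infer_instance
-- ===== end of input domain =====

-- B replaces A's running-accumulator loop by an index-first decomposition: collect delimiter indices, then slice; same cost (alternative).


-- ===== PORT A =====
def lines_to_records (lines : List String) : List (List String) :=
  (lines.foldl (fun (st : List (List String) × List String) line =>
      if PySem.Str.rstrip line == "//" then (st.1 ++ [st.2], []) else (st.1, st.2 ++ [line]))
    ([], [])).1

-- ===== PORT B =====
def lines_to_records_alt (lines : List String) : List (List String) :=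
  let cuts := ((PySem.List.enumerate lines 0).filter (fun p => PySem.Str.rstrip p.2 == "//")).map (fun p => p.1)
  (cuts.foldl (fun (st : List (List String) × Int) c =>
      (st.1 ++ [PySem.List.slice lines (some st.2) (some c)], c + 1)) ([], 0)).1

-- ===== PRECONDITION & SPEC =====
def Spec_lines_to_records (lines : List String) (out : List (List String)) : Prop := out = lines_to_records_alt lines
instance (lines : List String) (out : List (List String)) : Decidable (Spec_lines_to_records lines out) := by unfold Spec_lines_to_records; infer_instance

-- ===== CLAIM (what is proved, stated in full; the proofs are below) =====
def Claim_equal_lines_to_records : Prop := ∀ (lines : List String), Dom_lines_to_records lines → Spec_lines_to_records lines (lines_to_records lines)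

-- ===== LEMMAS AND PROOFS =====

-- invariant: B's fold over the delimiter indices of `rest` (offset = pre.length, next slice
-- start `start` with start ≤ pre.length) equals A's fold over `rest` with current = pre.drop start
theorem lines_to_records_key (rest : List String) :
    ∀ (pre : List String) (recs : List (List String)) (start : Nat), start ≤ pre.length →
    ((((PySem.List.enumerate rest (pre.length : Int)).filter (fun p => PySem.Str.rstrip p.2 == "//")).map (fun p => p.1)).foldl
        (fun (st : List (List String) × Int) c =>
          (st.1 ++ [PySem.List.slice (pre ++ rest) (some st.2) (some c)], c + 1)) (recs, (start : Int))).1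
    = (rest.foldl (fun (st : List (List String) × List String) line =>
        if PySem.Str.rstrip line == "//" then (st.1 ++ [st.2], []) else (st.1, st.2 ++ [line]))
      (recs, pre.drop start)).1 := by
  induction rest with
  | nil => intro pre recs start h; simp [PySem.List.enumerate_nil]
  | cons l rest ih =>
    intro pre recs start h
    rw [PySem.List.enumerate_cons]
    by_cases hd : PySem.Str.rstrip l == "//"
    · have hslice : PySem.List.slice (pre ++ l :: rest) (some ((start : Nat) : Int)) (some ((pre.length : Nat) : Int))
          = pre.drop start := by
        rw [PySem.List.slice_natCast, List.drop_append_of_le_length h,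
          List.take_append_of_le_length (by simp)]
        · simp
      have hfull : pre ++ l :: rest = (pre ++ [l]) ++ rest := by simp
      simp only [List.filter_cons, hd, if_pos, List.map_cons, List.foldl_cons]
      rw [hslice, hfull]
      have := ih (pre ++ [l]) (recs ++ [pre.drop start]) (pre.length + 1) (by simp)
      simp only [List.length_append, List.length_cons, List.length_nil] at this ⊢
      push_cast at this ⊢
      rw [this]
      simp
    · have hfull : pre ++ l :: rest = (pre ++ [l]) ++ rest := by simp
      simp only [List.filter_cons, hd]
      rw [hfull]
      have := ih (pre ++ [l]) recs start (by simpa using Nat.le_succ_of_le h)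
      simp only [List.length_append, List.length_cons, List.length_nil] at this ⊢
      push_cast at this ⊢
      rw [this, List.drop_append_of_le_length h]
      have hd' : ¬ PySem.Str.rstrip l = "//" := by simpa using hd
      simp [hd']

-- ===== VERDICT (by name: the statement is the Claim_ definition above) =====
theorem lines_to_records_spec : Claim_equal_lines_to_records := by
  intro lines _
  unfold Spec_lines_to_records lines_to_records lines_to_records_alt
  have := lines_to_records_key lines [] [] 0 (by simp)
  simpa using this.symm
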